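-- pv_equiv track=rewrite | github.com/GabrielBarbosaFernandes/Grupo-17 | compilador.py | estadoPalavraChave
-- ===== SOURCE A (Python) =====
-- TOKEN_KEYWORD = "KEYWORD"
--
-- TOKEN_ERROR = "ERROR"
--
-- def estadoPalavraChave(linha, pos, tokens):
--     palavra = ""
--
--     while pos < len(linha):
--         c = linha[pos]
--
--         if c >= "A" and c <= "Z":
--             palavra = palavra + c
--             pos = pos + 1
--         else:
--             break
--
--     if pos < len(linha):
--         c = linha[pos]
--
--         if (c >= "a" and c <= "z") or (c >= "0" and c <= "9"):
--             while pos < len(linha):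
--                 c = linha[pos]
--                 if c == " " or c == "\t" or c == "(" or c == ")":
--                     break
--                 palavra = palavra + c
--                 pos = pos + 1
--
--             tokens.append((TOKEN_ERROR, palavra))
--             return pos
--
--     tokens.append((TOKEN_KEYWORD, palavra))
--     return pos
-- ===== SOURCE B (Python) =====
-- import re
--
-- TOKEN_KEYWORD = "KEYWORD"
-- TOKEN_ERROR = "ERROR"
--
-- def estadoPalavraChave(linha, pos, tokens):
--     rest = linha[pos:]
--     palavra = re.match(r"[A-Z]*", rest).group()
--     pos += len(palavra)
--     rest = rest[len(palavra):]
--     if re.match(r"[a-z0-9]", rest):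
--         cauda = re.match(r"[^ \t()]*", rest).group()
--         tokens.append((TOKEN_ERROR, palavra + cauda))
--         return pos + len(cauda)
--     tokens.append((TOKEN_KEYWORD, palavra))
--     return pos
-- ===== Notes on version B (the rewrite author's own statement) =====
-- stated objective: idiomatic
-- what changed: B replaces A's three hand-written character-by-character while/if loops (which grow palavra by repeated string concatenation) by regex prefix matching on the suffix linha[pos:] (re.match of [A-Z]*, a one-char [a-z0-9] test, then [^ \t()]*), advancing pos by the matched lengths.
-- outside the precondition, e.g. on estadoPalavraChave('AB', -1, []): A returns 2, B returns 0; on estadoPalavraChave('q', -4, []): A raises IndexError, B returns -3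
import Mathlib
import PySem

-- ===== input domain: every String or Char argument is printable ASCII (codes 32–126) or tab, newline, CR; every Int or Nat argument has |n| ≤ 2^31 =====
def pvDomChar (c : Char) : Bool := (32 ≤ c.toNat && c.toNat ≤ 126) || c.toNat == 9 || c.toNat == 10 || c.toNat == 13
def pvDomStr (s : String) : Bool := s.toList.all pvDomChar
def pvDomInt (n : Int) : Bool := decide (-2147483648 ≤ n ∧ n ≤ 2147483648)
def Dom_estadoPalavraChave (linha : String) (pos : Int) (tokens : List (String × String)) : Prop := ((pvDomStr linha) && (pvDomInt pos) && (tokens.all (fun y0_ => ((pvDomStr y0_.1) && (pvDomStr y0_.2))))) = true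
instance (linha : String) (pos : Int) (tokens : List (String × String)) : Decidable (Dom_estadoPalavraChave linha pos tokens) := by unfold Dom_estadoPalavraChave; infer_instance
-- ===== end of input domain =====

-- One-line: B replaces A's three hand-rolled character loops by regex-style prefix matching
-- (take the uppercase prefix, then on an error entry the non-break prefix) on the suffix linha[pos:];
-- equivalence is about the RETURN value only — both Pythons also append one token to `tokens`
-- (the same token on every input admitted by Pre_).

-- ===== PORT A =====
-- while pos < len(linha): c = linha[pos]; if 'A' <= c <= 'Z': palavra += c; pos += 1 else break
def pvLoopUpper (l : List Char) (pos : Int) (palavra : List Char) : List Char × Int :=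
  if _h : pos < (l.length : Int) then
    match PySem.List.pyGet? l pos with
    | none => (palavra, pos)   -- Python raises IndexError here (pos < -len); outside Pre_
    | some c =>
      if 'A' ≤ c && c ≤ 'Z' then pvLoopUpper l (pos + 1) (palavra ++ [c])
      else (palavra, pos)
  else (palavra, pos)
termination_by ((l.length : Int) - pos).toNat
decreasing_by omega

-- while pos < len(linha): c = linha[pos]; if c in " \t()": break; palavra += c; pos += 1
def pvLoopErr (l : List Char) (pos : Int) (palavra : List Char) : List Char × Int :=
  if _h : pos < (l.length : Int) then
    match PySem.List.pyGet? l pos with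
    | none => (palavra, pos)   -- Python raises IndexError here; outside Pre_
    | some c =>
      if c == ' ' || c == '\t' || c == '(' || c == ')' then (palavra, pos)
      else pvLoopErr l (pos + 1) (palavra ++ [c])
  else (palavra, pos)
termination_by ((l.length : Int) - pos).toNat
decreasing_by omega

def estadoPalavraChave (linha : String) (pos : Int) (tokens : List (String × String)) : Int :=
  let l := linha.toList
  let r1 := pvLoopUpper l pos []
  let palavra := r1.1
  let pos1 := r1.2
  if pos1 < (l.length : Int) then
    match PySem.List.pyGet? l pos1 with
    | none => pos1   -- unreachable: pos1 < len and (under Pre_) 0 ≤ pos1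
    | some c =>
      if ('a' ≤ c && c ≤ 'z') || ('0' ≤ c && c ≤ '9') then
        (pvLoopErr l pos1 palavra).2
      else pos1
  else pos1

-- ===== PORT B =====
-- rest = linha[pos:]; palavra = match of [A-Z]* ; then if rest begins with [a-z0-9],
-- cauda = match of [^ \t()]* ; return pos advanced by the matched lengths.
def estadoPalavraChave_alt (linha : String) (pos : Int) (tokens : List (String × String)) : Int :=
  let rest := PySem.List.slice linha.toList (some pos) none
  let palavra := rest.takeWhile (fun c => 'A' ≤ c && c ≤ 'Z')
  let pos1 := pos + (palavra.length : Int)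
  let rest1 := rest.drop palavra.length
  match rest1 with
  | c :: _ =>
    if ('a' ≤ c && c ≤ 'z') || ('0' ≤ c && c ≤ '9') then
      let cauda := rest1.takeWhile (fun c => !(c == ' ' || c == '\t' || c == '(' || c == ')'))
      pos1 + (cauda.length : Int)
    else pos1
  | [] => pos1

-- ===== PRECONDITION & SPEC =====
-- Pre_ excludes negative pos: there A's negative-index wraparound rescans characters from the
-- start of the string (a quirky value no caller would specify), and for pos < -len(linha) A
-- raises IndexError; B naturally slices the suffix instead.
def Pre_estadoPalavraChave (linha : String) (pos : Int) (tokens : List (String × String)) : Prop := 0 ≤ pos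
instance (linha : String) (pos : Int) (tokens : List (String × String)) : Decidable (Pre_estadoPalavraChave linha pos tokens) := by unfold Pre_estadoPalavraChave; infer_instance

def pvWitness_estadoPalavraChave : String × Int × (List (String × String)) := ("IF x(1)", 0, [])

def Spec_estadoPalavraChave (linha : String) (pos : Int) (tokens : List (String × String)) (out : Int) : Prop := out = estadoPalavraChave_alt linha pos tokens
instance (linha : String) (pos : Int) (tokens : List (String × String)) (out : Int) : Decidable (Spec_estadoPalavraChave linha pos tokens out) := by unfold Spec_estadoPalavraChave; infer_instance

-- ===== CLAIM (what is proved, stated in full; the proofs are below) =====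
def Claim_equal_estadoPalavraChave : Prop := ∀ (linha : String) (pos : Int) (tokens : List (String × String)), Dom_estadoPalavraChave linha pos tokens → Pre_estadoPalavraChave linha pos tokens → Spec_estadoPalavraChave linha pos tokens (estadoPalavraChave linha pos tokens)


-- ===== LEMMAS AND PROOFS =====

-- A's first loop, started at a nonnegative position n, consumes exactly the uppercase
-- takeWhile-prefix of (l.drop n) and advances pos by its length.
theorem pvLoopUpper_eq (l : List Char) : ∀ (n : Nat) (palavra : List Char),
    pvLoopUpper l (n : Int) palavra =
      (palavra ++ (l.drop n).takeWhile (fun c => 'A' ≤ c && c ≤ 'Z'),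
       (n : Int) + (((l.drop n).takeWhile (fun c => 'A' ≤ c && c ≤ 'Z')).length : Int)) := by
  intro n
  induction hn : l.length - n generalizing n with
  | zero =>
    intro palavra
    have hge : l.length ≤ n := by omega
    have hnl : ¬ ((n : Int) < (l.length : Int)) := by push_cast; omega
    rw [pvLoopUpper, dif_neg hnl, List.drop_eq_nil_of_le hge]
    simp
  | succ k ih =>
    intro palavra
    have hlt : n < l.length := by omega
    have hget : PySem.List.pyGet? l (n : Int) = some l[n] := by
      simp [PySem.List.pyGet?_natCast, List.getElem?_eq_getElem hlt]
    have hdrop : l.drop n = l[n] :: l.drop (n + 1) := List.drop_eq_getElem_cons hlt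
    rw [pvLoopUpper, dif_pos (by push_cast; omega : (n : Int) < (l.length : Int)), hget]
    simp only []
    by_cases hc : ('A' ≤ l[n] && l[n] ≤ 'Z') = true
    · have htw : (l.drop n).takeWhile (fun c => 'A' ≤ c && c ≤ 'Z')
          = l[n] :: (l.drop (n + 1)).takeWhile (fun c => 'A' ≤ c && c ≤ 'Z') := by
        rw [hdrop, List.takeWhile_cons, if_pos hc]
      have hcast : (n : Int) + 1 = ((n + 1 : Nat) : Int) := by push_cast; ring
      rw [if_pos hc, hcast, ih (n + 1) (by omega), htw]
      simp only [Prod.mk.injEq, List.length_cons]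
      constructor
      · simp
      · push_cast; ring
    · have htw : (l.drop n).takeWhile (fun c => 'A' ≤ c && c ≤ 'Z') = [] := by
        rw [hdrop, List.takeWhile_cons, if_neg hc]
      rw [if_neg hc, htw]
      simp

-- Same shape for A's second loop with the non-break predicate.
theorem pvLoopErr_eq (l : List Char) : ∀ (n : Nat) (palavra : List Char),
    pvLoopErr l (n : Int) palavra =
      (palavra ++ (l.drop n).takeWhile (fun c => !(c == ' ' || c == '\t' || c == '(' || c == ')')),
       (n : Int) + (((l.drop n).takeWhile (fun c => !(c == ' ' || c == '\t' || c == '(' || c == ')'))).length : Int)) := by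
  intro n
  induction hn : l.length - n generalizing n with
  | zero =>
    intro palavra
    have hge : l.length ≤ n := by omega
    have hnl : ¬ ((n : Int) < (l.length : Int)) := by push_cast; omega
    rw [pvLoopErr, dif_neg hnl, List.drop_eq_nil_of_le hge]
    simp
  | succ k ih =>
    intro palavra
    have hlt : n < l.length := by omega
    have hget : PySem.List.pyGet? l (n : Int) = some l[n] := by
      simp [PySem.List.pyGet?_natCast, List.getElem?_eq_getElem hlt]
    have hdrop : l.drop n = l[n] :: l.drop (n + 1) := List.drop_eq_getElem_cons hlt
    rw [pvLoopErr, dif_pos (by push_cast; omega : (n : Int) < (l.length : Int)), hget]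
    simp only []
    by_cases hc : (l[n] == ' ' || l[n] == '\t' || l[n] == '(' || l[n] == ')') = true
    · have htw : (l.drop n).takeWhile (fun c => !(c == ' ' || c == '\t' || c == '(' || c == ')')) = [] := by
        rw [hdrop, List.takeWhile_cons]
        simp only [hc, Bool.not_true, Bool.false_eq_true, if_false]
      rw [if_pos (by simpa using hc), htw]
      simp
    · have htw : (l.drop n).takeWhile (fun c => !(c == ' ' || c == '\t' || c == '(' || c == ')'))
          = l[n] :: (l.drop (n + 1)).takeWhile (fun c => !(c == ' ' || c == '\t' || c == '(' || c == ')')) := by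
        rw [hdrop, List.takeWhile_cons]
        simp only [hc, Bool.not_false, if_true]
      have hcast : (n : Int) + 1 = ((n + 1 : Nat) : Int) := by push_cast; ring
      rw [if_neg (by simpa using hc), hcast, ih (n + 1) (by omega), htw]
      simp only [Prod.mk.injEq, List.length_cons]
      constructor
      · simp
      · push_cast; ring

-- ===== VERDICT (by name: the statement is the Claim_ definition above) =====
theorem estadoPalavraChave_spec : Claim_equal_estadoPalavraChave := by
  unfold Claim_equal_estadoPalavraChave
  intro linha pos tokens _hdom hpre
  unfold Pre_estadoPalavraChave at hpre
  obtain ⟨n, rfl⟩ : ∃ n : Nat, pos = (n : Int) := ⟨pos.toNat, (Int.toNat_of_nonneg hpre).symm⟩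
  unfold Spec_estadoPalavraChave
  simp only [estadoPalavraChave, estadoPalavraChave_alt]
  rw [pvLoopUpper_eq linha.toList n [], PySem.List.slice_from_natCast]
  set l := linha.toList with hl
  set tw := (l.drop n).takeWhile (fun c => 'A' ≤ c && c ≤ 'Z') with htw
  set k := tw.length with hk
  have hrest1 : (l.drop n).drop k = l.drop (n + k) := by
    rw [List.drop_drop, Nat.add_comm]
  have hcast : (n : Int) + (k : Int) = ((n + k : Nat) : Int) := by push_cast; ring
  simp only [List.nil_append, hrest1]
  rcases h1 : l.drop (n + k) with _ | ⟨c, rest⟩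
  · have hge : l.length ≤ n + k := by
      by_contra hlt
      have := List.drop_eq_getElem_cons (l := l) (by omega : n + k < l.length)
      rw [h1] at this
      have hlen := congrArg List.length this
      simp at hlen
      omega
    rw [if_neg (by push_cast; omega : ¬ ((n : Int) + (k : Int) < (l.length : Int)))]
  · have hlt : n + k < l.length := by
      by_contra hge
      rw [List.drop_eq_nil_of_le (by omega)] at h1
      have hlen := congrArg List.length h1
      simp at hlen
    have hc : l[n + k] = c := by
      have h2 := List.drop_eq_getElem_cons (l := l) hlt
      rw [h1] at h2
      exact (List.cons_eq_cons.mp h2.symm).1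
    have hget : PySem.List.pyGet? l ((n : Int) + (k : Int)) = some c := by
      rw [hcast, PySem.List.pyGet?_natCast, List.getElem?_eq_getElem hlt, hc]
    rw [if_pos (by push_cast; omega : (n : Int) + (k : Int) < (l.length : Int)), hget]
    simp only []
    by_cases hcc : (('a' ≤ c && c ≤ 'z') || ('0' ≤ c && c ≤ '9')) = true
    · rw [if_pos (by simpa using hcc), if_pos (by simpa using hcc)]
      rw [hcast, pvLoopErr_eq l (n + k) tw, ← h1]
    · rw [if_neg (by simpa using hcc), if_neg (by simpa using hcc)]
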